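-- pv_equiv track=rewrite | github.com/josephgruber/advent-of-code | legacy/solutions/y2019/solution_2019_15.py | enable_o2
-- ===== SOURCE A (Python) =====
-- from typing import Deque, Dict, List, Set, Tuple
--
-- def enable_o2(grid: Dict[Tuple[int, int], int]) -> int:
--   positions: List[Tuple] = [(0, 0), (0, 1), (1, 0), (0, -1), (-1, 0)]
--   steps: int = 0
--
--   while 1 in grid.values():
--     for key, val in grid.items():
--       if val == 2:
--         for position in positions:
--           neighbor: Tuple[int, int] = (key[0] + position[0], key[1] + position[1])
--           if neighbor in grid and grid[neighbor] == 1: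
--             grid[neighbor] = 3
--
--     for key, val in grid.items():
--       if val == 3:
--         grid[key] = 2
--
--     steps += 1
--
--   return steps
-- ===== SOURCE B (Python) =====
-- # B: multi-source BFS over the key sets -- frontier = the cells oxygenated in the
-- # last round only, so each cell is visited once (O(N) total) instead of A's rescan
-- # of the whole dict every round (O(rounds*N)).  Return value only: A mutates its
-- # argument dict in place, B does not.
-- def enable_o2(grid):
--     ones = {k for k, v in grid.items() if v == 1}
--     frontier = {k for k, v in grid.items() if v == 2}
--     steps = 0
--     while ones:
--         frontier = {(x + dx, y + dy) for (x, y) in frontier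
--                     for dx, dy in ((0, 1), (1, 0), (0, -1), (-1, 0))} & ones
--         ones -= frontier
--         steps += 1
--     return steps
-- ===== Notes on version B (the rewrite author's own statement) =====
-- stated objective: alternative
-- what changed: A rescans the entire dict every round (push from every 2-cell via a sentinel value 3, then a second sweep converting 3 to 2); B is a multi-source BFS over two key sets: the frontier holds only the cells oxygenated in the previous round, each cell is expanded exactly once, and steps counts the BFS layers.
-- outside the precondition, e.g. on enable_o2({(0, 0): 3, (0, 1): 1}): A returns 2, B does not finish within the time limit; on enable_o2({(1, 2, 3): 2, (1, 3): 1}): A returns 1, B raises ValueError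
import Mathlib
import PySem

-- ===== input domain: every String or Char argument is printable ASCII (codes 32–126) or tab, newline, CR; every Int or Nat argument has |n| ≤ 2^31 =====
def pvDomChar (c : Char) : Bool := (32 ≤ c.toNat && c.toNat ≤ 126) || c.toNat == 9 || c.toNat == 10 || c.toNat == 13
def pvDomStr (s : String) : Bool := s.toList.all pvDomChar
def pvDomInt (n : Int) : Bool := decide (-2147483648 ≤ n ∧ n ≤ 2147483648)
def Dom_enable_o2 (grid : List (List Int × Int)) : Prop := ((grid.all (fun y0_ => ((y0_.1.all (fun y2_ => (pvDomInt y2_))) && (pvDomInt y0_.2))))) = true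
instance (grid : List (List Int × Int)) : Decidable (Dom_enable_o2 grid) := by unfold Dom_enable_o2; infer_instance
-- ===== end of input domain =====

-- B replaces A's per-round rescan of the whole dict (push from every 2-cell via the
-- sentinel value 3, then a second sweep 3 → 2) by a multi-source BFS over two key
-- sets whose frontier holds only the last round's cells; return value only: A
-- mutates its argument dict in place, B does not.

-- ===== PORT A =====
def pvPositions : List (Int × Int) := [(0, 0), (0, 1), (1, 0), (0, -1), (-1, 0)]

-- inner 'for position in positions' loop of A's first pass, expanding from a 2-cell 'key'
def pvMarkFrom (acc : PySem.Dict (List Int) Int) (key : List Int) : PySem.Dict (List Int) Int :=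
  pvPositions.foldl (fun acc2 p =>
    match PySem.List.pyGet? key 0, PySem.List.pyGet? key 1 with
    | some k0, some k1 =>
      if acc2.contains [k0 + p.1, k1 + p.2] && (acc2.get? [k0 + p.1, k1 + p.2] == some 1)
      then acc2.insert [k0 + p.1, k1 + p.2] 3 else acc2
    | _, _ => acc2)   -- key[0] / key[1]: IndexError in Python; such inputs are outside Pre_
    acc

-- A's first pass: 'for key, val in grid.items(): if val == 2: …' — the pass only changes
-- values 1 → 3, so the set of cells passing the 'val == 2' test is not affected by the
-- in-place updates; iterating the items snapshot with an accumulator dict is exact.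
def pvRound1 (g : PySem.Dict (List Int) Int) : PySem.Dict (List Int) Int :=
  g.items.foldl (fun acc kv => if kv.2 == 2 then pvMarkFrom acc kv.1 else acc) g

-- A's second pass: 'for key, val in grid.items(): if val == 3: grid[key] = 2' — it only
-- changes values 3 → 2, so the 'val == 3' test is likewise unaffected by the updates.
def pvRound2 (h : PySem.Dict (List Int) Int) : PySem.Dict (List Int) Int :=
  h.items.foldl (fun acc kv => if kv.2 == 3 then acc.insert kv.1 2 else acc) h

-- 'while 1 in grid.values()'; fuel: each terminating round converts at least one 1, so
-- (count of 1s) + 1 rounds suffice on inputs where the Python terminates (i.e. inside Pre_).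
def pvLoopA : Nat → PySem.Dict (List Int) Int → Int → Int
  | 0, _, steps => steps
  | n + 1, g, steps =>
    if (PySem.Dict.values g).contains 1 then pvLoopA n (pvRound2 (pvRound1 g)) (steps + 1)
    else steps

def enable_o2 (grid : List (List Int × Int)) : Int :=
  pvLoopA ((PySem.Dict.values (PySem.Dict.mk grid)).count 1 + 1) (PySem.Dict.mk grid) 0

-- ===== PORT B =====
-- the four grid neighbours of a frontier cell '(x, y)'; a non-pair key makes the
-- Python unpacking '(x, y)' raise ValueError — such inputs are outside Pre_
def pvNbrs4 (c : List Int) : List (List Int) :=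
  match c with
  | [x, y] => [[x, y + 1], [x + 1, y], [x, y - 1], [x - 1, y]]
  | _ => []

-- 'while ones:' — one BFS layer per iteration: the new frontier is the neighbour set of
-- the old frontier intersected with the remaining 1-cells, which then leave 'ones';
-- fuel: each productive layer removes at least one cell from 'ones'.
def pvBFS : Nat → PySem.Set (List Int) → PySem.Set (List Int) → Int → Int
  | 0, _, _, steps => steps
  | n + 1, ones, frontier, steps =>
    if ones.isEmpty then steps
    else
      let f' := PySem.Set.inter (PySem.Set.ofList (frontier.flatMap pvNbrs4)) ones
      pvBFS n (PySem.Set.diff ones f') f' (steps + 1)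

def enable_o2_alt (grid : List (List Int × Int)) : Int :=
  let items := (PySem.Dict.mk grid).items
  let onesL := (items.filter (fun kv => kv.2 == 1)).map Prod.fst
  let twosL := (items.filter (fun kv => kv.2 == 2)).map Prod.fst
  pvBFS (onesL.length + 1) (PySem.Set.ofList onesL) (PySem.Set.ofList twosL) 0

-- ===== PRECONDITION & SPEC =====
-- the four grid cells adjacent to a coordinate pair (for the connectivity condition below)
def pvReachNbrs (k : List Int) : List (List Int) :=
  match k with
  | k0 :: k1 :: _ => [[k0, k1 + 1], [k0 + 1, k1], [k0, k1 - 1], [k0 - 1, k1]]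
  | _ => []

def pvGrow (ones : List (List Int)) (s : List (List Int)) : List (List Int) :=
  s ++ ones.filter (fun k => !s.contains k && (pvReachNbrs k).any (fun n => s.contains n))

-- A grid with no 1-cell at all is always admitted (the loop body never runs).  Otherwise
-- Pre_ excludes: duplicate keys (not a Python dict); grids already containing A's internal
-- sentinel value 3 (A accidentally promotes them to oxygen sources after one round); grids
-- where a 1- or 2-valued key is not a coordinate pair (not a grid: A raises IndexError,
-- loops forever, or pushes from k[0],k[1] of a longer tuple, while B's unpacking raises);
-- and grids with a 1-cell not connected to any 2-cell through 1-cells (A's while loop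
-- never terminates there) — the last conjunct is the transitive closure of one-step
-- adjacency, a termination property, not a port of either algorithm.
def Pre_enable_o2 (grid : List (List Int × Int)) : Prop :=
  (∀ kv ∈ grid, kv.2 ≠ 1) ∨
  ((grid.map Prod.fst).Nodup ∧
  (∀ kv ∈ grid, kv.2 ≠ 3) ∧
  (∀ kv ∈ grid, kv.2 = 1 ∨ kv.2 = 2 → kv.1.length = 2) ∧
  (∀ k ∈ (grid.filter (fun kv => kv.2 == 1)).map Prod.fst,
     k ∈ (pvGrow ((grid.filter (fun kv => kv.2 == 1)).map Prod.fst))^[grid.length]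
           ((grid.filter (fun kv => kv.2 == 2)).map Prod.fst)))
instance (grid : List (List Int × Int)) : Decidable (Pre_enable_o2 grid) := by
  unfold Pre_enable_o2; infer_instance

def pvWitness_enable_o2 : (List (List Int × Int)) := [([0, 0], 2), ([0, 1], 1), ([1, 1], 1), ([5, 5], 0)]

def Spec_enable_o2 (grid : List (List Int × Int)) (out : Int) : Prop := out = enable_o2_alt grid
instance (grid : List (List Int × Int)) (out : Int) : Decidable (Spec_enable_o2 grid out) := by unfold Spec_enable_o2; infer_instance

-- ===== CLAIM (what is proved, stated in full; the proofs are below) =====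
def Claim_equal_enable_o2 : Prop := ∀ (grid : List (List Int × Int)), Dom_enable_o2 grid → Pre_enable_o2 grid → Spec_enable_o2 grid (enable_o2 grid)

-- ===== LEMMAS AND PROOFS =====

-- the invariant A's round preserves (Pre_'s structural part, on the current dict)
def pvInv (g : PySem.Dict (List Int) Int) : Prop :=
  g.keys.Nodup ∧ (∀ kv ∈ g.items, kv.2 ≠ 3) ∧
  (∀ kv ∈ g.items, kv.2 = 1 ∨ kv.2 = 2 → kv.1.length = 2)

-- the five push targets of a 2-cell (empty when the key is too short: pvMarkFrom skips)
def pvNbrs5 (k : List Int) : List (List Int) :=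
  match PySem.List.pyGet? k 0, PySem.List.pyGet? k 1 with
  | some k0, some k1 => pvPositions.map (fun p => [k0 + p.1, k1 + p.2])
  | _, _ => []

-- all push targets of the 2-cells of an items list
def pvTargets (G : List (List Int × Int)) : List (List Int) :=
  (G.filter (fun kv => kv.2 == 2)).flatMap (fun kv => pvNbrs5 kv.1)

-- items after A's first pass, as a map over the original items
def pvMapMark (G : List (List Int × Int)) (ns : List (List Int)) : List (List Int × Int) :=
  G.map (fun kv => if kv.2 = 1 ∧ kv.1 ∈ ns then (kv.1, (3 : Int)) else kv)

-- items after A's second pass, as a map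
def pvMapConv (H : List (List Int × Int)) (ts : List (List Int)) : List (List Int × Int) :=
  H.map (fun kv => if kv.2 = 3 ∧ kv.1 ∈ ts then (kv.1, (2 : Int)) else kv)

-- one marking attempt of pvMarkFrom
def pvAdd1 (acc : PySem.Dict (List Int) Int) (nb : List Int) : PySem.Dict (List Int) Int :=
  if acc.contains nb && (acc.get? nb == some 1) then acc.insert nb 3 else acc

theorem pvMapMark_fst (G : List (List Int × Int)) (ns : List (List Int)) :
    (pvMapMark G ns).map Prod.fst = G.map Prod.fst := by
  simp only [pvMapMark, List.map_map]
  refine List.map_congr_left (fun kv _ => ?_)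
  by_cases h : kv.2 = 1 ∧ kv.1 ∈ ns <;> simp [h]

theorem pvMapMark_nil (G : List (List Int × Int)) : pvMapMark G [] = G := by
  simp [pvMapMark]

-- get? on a key-preserving map of the items
theorem pv_get?_map_none {G : List (List Int × Int)} {F : List Int × Int → List Int × Int}
    (hF : ∀ kv, (F kv).1 = kv.1) {k : List Int}
    (h : (PySem.Dict.mk G).get? k = none) : (PySem.Dict.mk (G.map F)).get? k = none := by
  induction G with
  | nil => simp [PySem.Dict.get?]
  | cons kv rest ih =>
    rw [List.map_cons]
    have h2 := h
    rw [show (F kv) = ((F kv).1, (F kv).2) from rfl, PySem.Dict.get?_mk_cons, hF kv]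
    rw [PySem.Dict.get?_mk_cons] at h2
    by_cases hk : (kv.1 == k) = true
    · simp [hk] at h2
    · simp only [hk] at h2 ⊢
      exact ih h2

theorem pv_get?_map_some {G : List (List Int × Int)} {F : List Int × Int → List Int × Int}
    (hF : ∀ kv, (F kv).1 = kv.1) {k : List Int} {v : Int}
    (h : (PySem.Dict.mk G).get? k = some v) :
    (PySem.Dict.mk (G.map F)).get? k = some (F (k, v)).2 := by
  induction G with
  | nil => simp [PySem.Dict.get?] at h
  | cons kv rest ih =>
    rw [List.map_cons]
    have h2 := h
    rw [show (F kv) = ((F kv).1, (F kv).2) from rfl, PySem.Dict.get?_mk_cons, hF kv]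
    rw [PySem.Dict.get?_mk_cons] at h2
    by_cases hk : (kv.1 == k) = true
    · simp only [hk, if_true] at h2 ⊢
      have hv : kv.2 = v := by simpa using h2
      have hkk : kv = (k, v) := by
        obtain ⟨a, b⟩ := kv
        have : a = k := by simpa using hk
        simp_all
      rw [hkk]
    · simp only [hk] at h2 ⊢
      exact ih h2

-- keys are unique: two items entries with the same key carry the same value
theorem pv_mem_items_val {G : List (List Int × Int)} (hnd : (G.map Prod.fst).Nodup)
    {k : List Int} {v w : Int} (h1 : (k, v) ∈ G) (h2 : (PySem.Dict.mk G).get? k = some w) :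
    v = w := by
  have := PySem.Dict.get?_of_mem_items (PySem.Dict.mk G) h1 (by simpa [PySem.Dict.keys] using hnd)
  rw [this] at h2; simpa using h2

-- the marking map, with its key-preservation fact
theorem pvMarkF_fst (ns : List (List Int)) (kv : List Int × Int) :
    ((fun kv => if kv.2 = 1 ∧ kv.1 ∈ ns then (kv.1, (3 : Int)) else kv) kv).1 = kv.1 := by
  by_cases h : kv.2 = 1 ∧ kv.1 ∈ ns <;> simp [h]

theorem pvAdd1_items {G : List (List Int × Int)} (hnd : (G.map Prod.fst).Nodup)
    {acc : PySem.Dict (List Int) Int} {ns : List (List Int)}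
    (hacc : acc.items = pvMapMark G ns) (nb : List Int) :
    (pvAdd1 acc nb).items = pvMapMark G (ns ++ [nb]) := by
  have hacc' : acc = PySem.Dict.mk (pvMapMark G ns) := PySem.Dict.ext hacc
  subst hacc'
  have hF := pvMarkF_fst ns
  rcases hg : (PySem.Dict.mk G).get? nb with _ | v
  · -- nb is not a key of the grid: the attempt is skipped and no entry has key nb
    have hget : (PySem.Dict.mk (pvMapMark G ns)).get? nb = none := pv_get?_map_none hF hg
    have hcon : (PySem.Dict.mk (pvMapMark G ns)).contains nb = false := by
      rw [PySem.Dict.contains_eq_isSome_get?, hget]; rfl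
    have hnb : ∀ kv ∈ G, kv.1 ≠ nb := by
      intro kv hkv hEq
      have : nb ∈ (PySem.Dict.mk G).keys := by
        simp only [PySem.Dict.keys]
        exact hEq ▸ List.mem_map_of_mem hkv
      rw [PySem.Dict.get?_eq_none_iff_not_mem_keys] at hg
      exact hg this
    simp only [pvAdd1, hcon, Bool.false_and]
    refine List.map_congr_left (fun kv hkv => ?_)
    simp [List.mem_append, hnb kv hkv]
  · have hget : (PySem.Dict.mk (pvMapMark G ns)).get? nb
        = some ((if v = 1 ∧ nb ∈ ns then ((nb : List Int), (3 : Int)) else (nb, v)).2) :=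
      pv_get?_map_some hF hg
    have hval1 : ∀ kv ∈ G, kv.1 = nb → kv.2 = v := by
      intro kv hkv hEq
      have : (nb, kv.2) ∈ G := by rw [← hEq]; exact hkv
      exact pv_mem_items_val hnd this hg
    by_cases hmark : v = 1 ∧ nb ∉ ns
    · -- fresh 1-cell: it is marked
      obtain ⟨rfl, hns⟩ := hmark
      rw [if_neg (by simp [hns])] at hget
      have hcon : (PySem.Dict.mk (pvMapMark G ns)).contains nb = true := by
        rw [PySem.Dict.contains_eq_isSome_get?, hget]; rfl
      simp only [pvAdd1, hcon, hget, Bool.true_and, beq_self_eq_true, if_true]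
      rw [PySem.Dict.items_insert_of_contains _ _ hcon]
      show (List.map _ (List.map _ G)) = _
      rw [List.map_map]
      refine List.map_congr_left (fun kv hkv => ?_)
      by_cases hEq : kv.1 = nb
      · have h2 : kv.2 = 1 := hval1 kv hkv hEq
        simp [Function.comp, hEq, h2, hns]
      · simp only [Function.comp_apply]
        have : ((if kv.2 = 1 ∧ kv.1 ∈ ns then ((kv.1 : List Int), (3:Int)) else kv).1 == nb) = false := by
          rw [pvMarkF_fst]; simpa using hEq
        rw [if_neg (by simp [this])]
        by_cases hc : kv.2 = 1 ∧ kv.1 ∈ ns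
        · simp [hc, hEq]
        · rw [if_neg hc, if_neg (by rintro ⟨h1, h2⟩; simp [hEq] at h2; exact hc ⟨h1, h2⟩)]
    · -- already marked or not a 1-cell: skipped, and the target map is unchanged
      have hskip : ((PySem.Dict.mk (pvMapMark G ns)).get? nb == some 1) = false := by
        rw [hget]
        by_cases hv : v = 1
        · subst hv
          have hns : nb ∈ ns := by by_contra hns; exact hmark ⟨rfl, hns⟩
          simp [hns]
        · simp [hv]
      simp only [pvAdd1, hskip, Bool.and_false]
      refine List.map_congr_left (fun kv hkv => ?_)
      by_cases hEq : kv.1 = nb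
      · have h2 : kv.2 = v := hval1 kv hkv hEq
        by_cases hv : v = 1
        · subst hv
          have hns : nb ∈ ns := by by_contra hns; exact hmark ⟨rfl, hns⟩
          simp [h2, hEq, hns]
        · simp [h2, hv, hEq]
      · simp [List.mem_append, hEq]

theorem pvMarkFrom_items {G : List (List Int × Int)} (hnd : (G.map Prod.fst).Nodup)
    {acc : PySem.Dict (List Int) Int} {ns : List (List Int)}
    (hacc : acc.items = pvMapMark G ns) (key : List Int) :
    (pvMarkFrom acc key).items = pvMapMark G (ns ++ pvNbrs5 key) := by
  rcases h0 : PySem.List.pyGet? key 0 with _ | k0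
  · have : pvMarkFrom acc key = acc := by
      simp [pvMarkFrom, h0]
    rw [this]
    simpa [pvNbrs5, h0] using hacc
  · rcases h1 : PySem.List.pyGet? key 1 with _ | k1
    · have : pvMarkFrom acc key = acc := by
        simp [pvMarkFrom, h0, h1]
      rw [this]
      simpa [pvNbrs5, h0, h1] using hacc
    · have hfold : pvMarkFrom acc key
          = pvAdd1 (pvAdd1 (pvAdd1 (pvAdd1 (pvAdd1 acc [k0 + 0, k1 + 0]) [k0 + 0, k1 + 1])
              [k0 + 1, k1 + 0]) [k0 + 0, k1 + (-1)]) [k0 + (-1), k1 + 0] := by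
        simp [pvMarkFrom, pvPositions, h0, h1, pvAdd1]
      have i1 := pvAdd1_items hnd hacc [k0 + 0, k1 + 0]
      have i2 := pvAdd1_items hnd i1 [k0 + 0, k1 + 1]
      have i3 := pvAdd1_items hnd i2 [k0 + 1, k1 + 0]
      have i4 := pvAdd1_items hnd i3 [k0 + 0, k1 + (-1)]
      have i5 := pvAdd1_items hnd i4 [k0 + (-1), k1 + 0]
      rw [hfold, i5, pvNbrs5, h0, h1]
      simp [pvPositions]

theorem pvRound1_fold {G : List (List Int × Int)} (hnd : (G.map Prod.fst).Nodup) :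
    ∀ (l : List (List Int × Int)) (acc : PySem.Dict (List Int) Int) (ns : List (List Int)),
      acc.items = pvMapMark G ns →
      ((l.foldl (fun acc kv => if kv.2 == 2 then pvMarkFrom acc kv.1 else acc) acc).items
        = pvMapMark G (ns ++ pvTargets l)) := by
  intro l
  induction l with
  | nil => intro acc ns hacc; simpa [pvTargets] using hacc
  | cons kv l ih =>
    intro acc ns hacc
    rw [List.foldl_cons]
    by_cases h2 : kv.2 = 2
    · rw [if_pos (by simpa using h2)]
      have := ih _ _ (pvMarkFrom_items hnd hacc kv.1)
      rw [this]
      simp [pvTargets, h2, List.append_assoc]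
    · rw [if_neg (by simpa using h2)]
      rw [ih _ _ hacc]
      simp [pvTargets, h2]

theorem pvRound1_items {g : PySem.Dict (List Int) Int} (hnd : (g.items.map Prod.fst).Nodup) :
    (pvRound1 g).items = pvMapMark g.items (pvTargets g.items) := by
  have := pvRound1_fold hnd g.items g [] (by simp [pvMapMark_nil])
  simpa [pvRound1] using this

theorem pvMapConv_nil (H : List (List Int × Int)) : pvMapConv H [] = H := by
  simp [pvMapConv]

theorem pvConvF_fst (ts : List (List Int)) (kv : List Int × Int) :
    ((fun kv => if kv.2 = 3 ∧ kv.1 ∈ ts then (kv.1, (2 : Int)) else kv) kv).1 = kv.1 := by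
  by_cases h : kv.2 = 3 ∧ kv.1 ∈ ts <;> simp [h]

theorem pvConvStep_items {H : List (List Int × Int)} (hnd : (H.map Prod.fst).Nodup)
    {acc : PySem.Dict (List Int) Int} {ts : List (List Int)}
    (hacc : acc.items = pvMapConv H ts) {kv : List Int × Int} (hkv : kv ∈ H) (h3 : kv.2 = 3) :
    (acc.insert kv.1 2).items = pvMapConv H (ts ++ [kv.1]) := by
  have hacc' : acc = PySem.Dict.mk (pvMapConv H ts) := PySem.Dict.ext hacc
  subst hacc'
  have hg : (PySem.Dict.mk H).get? kv.1 = some 3 := by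
    have : (kv.1, kv.2) ∈ H := by simpa using hkv
    rw [h3] at this
    exact PySem.Dict.get?_of_mem_items _ this (by simpa [PySem.Dict.keys] using hnd)
  have hval3 : ∀ kv' ∈ H, kv'.1 = kv.1 → kv'.2 = 3 := by
    intro kv' hkv' hEq
    have : (kv.1, kv'.2) ∈ H := by rw [← hEq]; exact hkv'
    exact pv_mem_items_val hnd this hg
  have hget : (PySem.Dict.mk (pvMapConv H ts)).get? kv.1
      = some ((if (3:Int) = 3 ∧ kv.1 ∈ ts then ((kv.1 : List Int), (2:Int)) else (kv.1, 3)).2) :=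
    pv_get?_map_some (pvConvF_fst ts) hg
  have hcon : (PySem.Dict.mk (pvMapConv H ts)).contains kv.1 = true := by
    rw [PySem.Dict.contains_eq_isSome_get?, hget]; rfl
  rw [PySem.Dict.items_insert_of_contains _ _ hcon]
  show (List.map _ (List.map _ H)) = _
  rw [List.map_map]
  refine List.map_congr_left (fun kv' hkv' => ?_)
  by_cases hEq : kv'.1 = kv.1
  · have h2 : kv'.2 = 3 := hval3 kv' hkv' hEq
    by_cases hts : kv.1 ∈ ts
    · simp [Function.comp, hEq, h2, hts]
    · simp [Function.comp, hEq, h2, hts]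
  · simp only [Function.comp_apply]
    have hne : ((if kv'.2 = 3 ∧ kv'.1 ∈ ts then ((kv'.1 : List Int), (2:Int)) else kv').1 == kv.1) = false := by
      rw [pvConvF_fst]; simpa using hEq
    rw [if_neg (by simp [hne])]
    by_cases hc : kv'.2 = 3 ∧ kv'.1 ∈ ts
    · simp [hc, hEq]
    · rw [if_neg hc, if_neg (by rintro ⟨ha, hb⟩; simp [hEq] at hb; exact hc ⟨ha, hb⟩)]

theorem pvRound2_fold {H : List (List Int × Int)} (hnd : (H.map Prod.fst).Nodup) :
    ∀ (l : List (List Int × Int)) (acc : PySem.Dict (List Int) Int) (ts : List (List Int)),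
      (∀ kv ∈ l, kv ∈ H) → acc.items = pvMapConv H ts →
      ((l.foldl (fun acc kv => if kv.2 == 3 then acc.insert kv.1 2 else acc) acc).items
        = pvMapConv H (ts ++ (l.filter (fun kv => kv.2 == 3)).map Prod.fst)) := by
  intro l
  induction l with
  | nil => intro acc ts _ hacc; simpa using hacc
  | cons kv l ih =>
    intro acc ts hsub hacc
    rw [List.foldl_cons]
    by_cases h3 : kv.2 = 3
    · rw [if_pos (by simpa using h3)]
      have := ih _ _ (fun kv' h => hsub kv' (List.mem_cons_of_mem _ h))
        (pvConvStep_items hnd hacc (hsub kv List.mem_cons_self) h3)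
      rw [this]
      simp [h3, List.append_assoc]
    · rw [if_neg (by simpa using h3)]
      rw [ih _ _ (fun kv' h => hsub kv' (List.mem_cons_of_mem _ h)) hacc]
      simp [h3]

theorem pvRound2_items {h : PySem.Dict (List Int) Int} (hnd : (h.items.map Prod.fst).Nodup) :
    (pvRound2 h).items = h.items.map (fun kv => if kv.2 = 3 then (kv.1, (2 : Int)) else kv) := by
  have := pvRound2_fold hnd h.items h [] (fun _ hk => hk) (by simp [pvMapConv_nil])
  rw [pvRound2, this]
  refine List.map_congr_left (fun kv hkv => ?_)
  by_cases h3 : kv.2 = 3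
  · rw [if_pos ⟨h3, List.mem_map_of_mem (List.mem_filter.mpr ⟨hkv, by simpa using h3⟩)⟩, if_pos h3]
  · rw [if_neg (by rintro ⟨ha, _⟩; exact h3 ha), if_neg h3]

-- the combined round of A, as one pure map over the items
def pvPhi (G : List (List Int × Int)) : (List Int × Int) → (List Int × Int) :=
  fun kv => if kv.2 = 1 ∧ kv.1 ∈ pvTargets G then (kv.1, (2 : Int)) else kv

theorem pvPhi_fst (G : List (List Int × Int)) (kv : List Int × Int) : (pvPhi G kv).1 = kv.1 := by
  unfold pvPhi; by_cases h : kv.2 = 1 ∧ kv.1 ∈ pvTargets G <;> simp [h]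

theorem pvStepA_items {g : PySem.Dict (List Int) Int} (hInv : pvInv g) :
    (pvRound2 (pvRound1 g)).items = g.items.map (pvPhi g.items) := by
  obtain ⟨hnd, hno3, _⟩ := hInv
  have hnd' : (g.items.map Prod.fst).Nodup := by simpa [PySem.Dict.keys] using hnd
  have h1 : ((pvRound1 g).items.map Prod.fst).Nodup := by
    rw [pvRound1_items hnd', pvMapMark_fst]; exact hnd'
  rw [pvRound2_items h1, pvRound1_items hnd']
  show (List.map _ (List.map _ g.items)) = _
  rw [List.map_map]
  refine List.map_congr_left (fun kv hkv => ?_)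
  simp only [Function.comp_apply, pvPhi]
  by_cases hc : kv.2 = 1 ∧ kv.1 ∈ pvTargets g.items
  · rw [if_pos hc, if_pos rfl, if_pos hc]
  · rw [if_neg hc, if_neg (fun h => hno3 kv hkv h), if_neg hc]

-- membership characterisations of the mapped items
theorem pv_mem_one_map (G : List (List Int × Int)) (c : List Int) :
    ((c, (1 : Int)) ∈ G.map (pvPhi G)) ↔ ((c, (1 : Int)) ∈ G ∧ c ∉ pvTargets G) := by
  simp only [List.mem_map, pvPhi]
  constructor
  · rintro ⟨⟨a, b⟩, hkv, hEq⟩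
    split at hEq
    case isTrue hc => exact absurd (congrArg Prod.snd hEq) (by simp)
    case isFalse hc =>
      have ha := congrArg Prod.fst hEq
      have hb := congrArg Prod.snd hEq
      simp only at ha hb
      subst ha; subst hb
      exact ⟨hkv, fun hT => hc ⟨rfl, hT⟩⟩
  · rintro ⟨h1, hT⟩
    exact ⟨(c, 1), h1, by simp [hT]⟩

theorem pv_mem_two_map (G : List (List Int × Int)) (c : List Int) :
    ((c, (2 : Int)) ∈ G.map (pvPhi G)) ↔
      ((c, (2 : Int)) ∈ G ∨ ((c, (1 : Int)) ∈ G ∧ c ∈ pvTargets G)) := by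
  simp only [List.mem_map, pvPhi]
  constructor
  · rintro ⟨⟨a, b⟩, hkv, hEq⟩
    split at hEq
    case isTrue hc =>
      have ha := congrArg Prod.fst hEq
      simp only at ha
      subst ha
      obtain ⟨hb, hT⟩ := hc
      simp only at hb
      subst hb
      exact Or.inr ⟨hkv, hT⟩
    case isFalse hc => exact Or.inl (hEq ▸ hkv)
  · rintro (h2 | ⟨h1, hT⟩)
    · refine ⟨(c, 2), h2, ?_⟩
      simp
    · exact ⟨(c, 1), h1, by simp [hT]⟩

theorem pv_eta {kv : List Int × Int} {v : Int} (h : kv.2 = v) : (kv.1, v) = kv := by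
  rw [← h]

theorem pv_mem_targets (H : List (List Int × Int)) (c : List Int) :
    c ∈ pvTargets H ↔ ∃ k, (k, (2 : Int)) ∈ H ∧ c ∈ pvNbrs5 k := by
  rw [pvTargets, List.mem_flatMap]
  constructor
  · rintro ⟨kv, hkv, hc⟩
    rw [List.mem_filter] at hkv
    obtain ⟨hmem, h2⟩ := hkv
    have h2' : kv.2 = 2 := by simpa using h2
    exact ⟨kv.1, by rw [pv_eta h2']; exact hmem, hc⟩
  · rintro ⟨k, hk, hc⟩
    exact ⟨(k, 2), List.mem_filter.mpr ⟨hk, by simp⟩, hc⟩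

theorem pv_pair_of_len2 {l : List Int} (h : l.length = 2) : ∃ x y, l = [x, y] := by
  match l, h with
  | [x, y], _ => exact ⟨x, y, rfl⟩

theorem pvNbrs5_pair (x y : Int) : pvNbrs5 [x, y] = [x, y] :: pvNbrs4 [x, y] := by
  rw [pvNbrs5]
  simp only [PySem.List.pyGet?, PySem.List.pyIdx?]
  norm_num [pvPositions, pvNbrs4, sub_eq_add_neg]

-- the bisimulation invariant between A's dict and B's (ones, frontier) pair
def pvCoup (g : PySem.Dict (List Int) Int) (S F : PySem.Set (List Int)) : Prop :=
  pvInv g ∧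
  (∀ k, k ∈ S ↔ (k, (1 : Int)) ∈ g.items) ∧
  (∀ f ∈ F, (f, (2 : Int)) ∈ g.items) ∧
  (∀ c, (c, (1 : Int)) ∈ g.items →
    (c ∈ pvTargets g.items ↔ ∃ f ∈ F, c ∈ pvNbrs4 f))

theorem pvStep_coup {g : PySem.Dict (List Int) Int} {S F : PySem.Set (List Int)}
    (hC : pvCoup g S F) :
    pvCoup (pvRound2 (pvRound1 g))
      (PySem.Set.diff S (PySem.Set.inter (PySem.Set.ofList (F.flatMap pvNbrs4)) S))
      (PySem.Set.inter (PySem.Set.ofList (F.flatMap pvNbrs4)) S) := by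
  obtain ⟨hInv, hS, hF, hP⟩ := hC
  obtain ⟨hnd, hno3, hlen⟩ := hInv
  have hit : (pvRound2 (pvRound1 g)).items = g.items.map (pvPhi g.items) :=
    pvStepA_items ⟨hnd, hno3, hlen⟩
  -- membership in the new frontier = "converted this round"
  have hf' : ∀ k, k ∈ PySem.Set.inter (PySem.Set.ofList (F.flatMap pvNbrs4)) S ↔
      ((k, (1 : Int)) ∈ g.items ∧ k ∈ pvTargets g.items) := by
    intro k
    rw [PySem.Set.mem_inter _ _ k, PySem.Set.mem_ofList _ k, List.mem_flatMap]
    constructor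
    · rintro ⟨⟨f, hfF, hkn⟩, hkS⟩
      have h1 : (k, (1 : Int)) ∈ g.items := (hS k).mp hkS
      refine ⟨h1, ?_⟩
      have h2 := hF f hfF
      obtain ⟨x, y, rfl⟩ := pv_pair_of_len2 (hlen (f, 2) h2 (Or.inr rfl))
      exact (pv_mem_targets _ _).mpr ⟨[x, y], h2, by rw [pvNbrs5_pair]; exact List.mem_cons_of_mem _ hkn⟩
    · rintro ⟨h1, hkT⟩
      obtain ⟨f, hfF, hk⟩ := (hP k h1).mp hkT
      exact ⟨⟨f, hfF, hk⟩, (hS k).mpr h1⟩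
  refine ⟨⟨?_, ?_, ?_⟩, ?_, ?_, ?_⟩
  · -- keys still unique
    show (pvRound2 (pvRound1 g)).keys.Nodup
    have : (pvRound2 (pvRound1 g)).keys = g.items.map Prod.fst := by
      show ((pvRound2 (pvRound1 g)).items.map Prod.fst) = _
      rw [hit, List.map_map]
      exact List.map_congr_left (fun kv _ => pvPhi_fst g.items kv)
    rw [this]
    simpa [PySem.Dict.keys] using hnd
  · -- still no sentinel 3
    intro kv hkv
    rw [hit, List.mem_map] at hkv
    obtain ⟨kv0, hkv0, rfl⟩ := hkv
    unfold pvPhi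
    by_cases hc : kv0.2 = 1 ∧ kv0.1 ∈ pvTargets g.items
    · simp [hc]
    · rw [if_neg hc]; exact hno3 kv0 hkv0
  · -- 1- and 2-cells are still coordinate pairs
    intro kv hkv hv
    rw [hit, List.mem_map] at hkv
    obtain ⟨kv0, hkv0, rfl⟩ := hkv
    unfold pvPhi at hv ⊢
    by_cases hc : kv0.2 = 1 ∧ kv0.1 ∈ pvTargets g.items
    · rw [if_pos hc]; exact hlen kv0 hkv0 (Or.inl hc.1)
    · rw [if_neg hc] at hv ⊢; exact hlen kv0 hkv0 hv
  · -- ones \ frontier' = the 1-cells of the new dict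
    intro k
    rw [PySem.Set.mem_diff _ _ k, hf' k, hS k, hit, pv_mem_one_map]
    constructor
    · rintro ⟨h1, hn⟩
      exact ⟨h1, fun hT => hn ⟨h1, hT⟩⟩
    · rintro ⟨h1, hT⟩
      exact ⟨h1, fun h => hT h.2⟩
  · -- the new frontier holds 2 in the new dict
    intro f hf
    obtain ⟨h1, hT⟩ := (hf' f).mp hf
    rw [hit, pv_mem_two_map]
    exact Or.inr ⟨h1, hT⟩
  · -- adjacency to a 2-cell of the new dict = adjacency to the new frontier
    intro c hc1
    rw [hit] at hc1
    obtain ⟨hcG, hcT⟩ := (pv_mem_one_map g.items c).mp hc1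
    rw [hit]
    constructor
    · intro hmem
      obtain ⟨t, ht2, hcn⟩ := (pv_mem_targets _ _).mp hmem
      rcases (pv_mem_two_map g.items t).mp ht2 with hold | ⟨ht1, htT⟩
      · exact absurd ((pv_mem_targets _ _).mpr ⟨t, hold, hcn⟩) hcT
      · have hct : c ≠ t := fun h => hcT (h ▸ htT)
        obtain ⟨x, y, rfl⟩ := pv_pair_of_len2 (hlen (t, 1) ht1 (Or.inl rfl))
        rw [pvNbrs5_pair] at hcn
        rcases List.mem_cons.mp hcn with h | h
        · exact absurd h hct
        · exact ⟨[x, y], (hf' [x, y]).mpr ⟨ht1, htT⟩, h⟩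
    · rintro ⟨f, hff', hcn⟩
      obtain ⟨hf1, hfT⟩ := (hf' f).mp hff'
      obtain ⟨x, y, rfl⟩ := pv_pair_of_len2 (hlen (f, 1) hf1 (Or.inl rfl))
      refine (pv_mem_targets _ _).mpr ⟨[x, y], ?_, ?_⟩
      · rw [pv_mem_two_map]; exact Or.inr ⟨hf1, hfT⟩
      · rw [pvNbrs5_pair]; exact List.mem_cons_of_mem _ hcn
  
theorem pvBisim (n : Nat) (g : PySem.Dict (List Int) Int) (S F : PySem.Set (List Int))
    (s : Int) (hC : pvCoup g S F) : pvLoopA n g s = pvBFS n S F s := by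
  induction n generalizing g S F s with
  | zero => rfl
  | succ n ih =>
    obtain ⟨hInv, hS, hF, hP⟩ := hC
    have hcond : ((PySem.Dict.values g).contains 1 = true) ↔ S ≠ [] := by
      constructor
      · intro h
        have : (1 : Int) ∈ g.items.map Prod.snd := by
          simpa [PySem.Dict.values] using h
        obtain ⟨kv, hkv, h1⟩ := List.mem_map.mp this
        intro hnil
        have : kv.1 ∈ S := (hS kv.1).mpr (by rw [pv_eta h1]; exact hkv)
        simp [hnil] at this
      · intro h
        obtain ⟨k, hk⟩ := List.exists_mem_of_ne_nil S h
        have h1 := (hS k).mp hk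
        have : (1 : Int) ∈ g.items.map Prod.snd := List.mem_map.mpr ⟨(k, 1), h1, rfl⟩
        simpa [PySem.Dict.values] using this
    simp only [pvLoopA, pvBFS]
    by_cases hne : S = []
    · rw [if_neg (fun h => hcond.mp h hne), if_pos (by simp [hne])]
    · rw [if_pos (hcond.mpr hne), if_neg (by simpa [List.isEmpty_iff] using hne)]
      exact ih _ _ _ _ (pvStep_coup ⟨hInv, hS, hF, hP⟩)

-- the two fuels are the same number
theorem pvFuel_eq (l : List (List Int × Int)) :
    (l.map Prod.snd).count 1 = ((l.filter (fun kv => kv.2 == (1 : Int))).map Prod.fst).length := by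
  rw [List.count_eq_countP, List.countP_map, List.countP_eq_length_filter,
    List.length_map]
  rfl

-- ===== VERDICT (by name: the statement is the Claim_ definition above) =====
theorem enable_o2_spec : Claim_equal_enable_o2 := by
  intro grid _ hpre
  rcases hpre with h1 | ⟨hnd, h3, hlen, _⟩
  · -- no 1-cell anywhere: A's loop condition is false at once and B's ones set is empty
    show enable_o2 grid = enable_o2_alt grid
    unfold enable_o2 enable_o2_alt
    have hfil : grid.filter (fun kv => kv.2 == (1 : Int)) = [] :=
      List.filter_eq_nil_iff.mpr (fun kv hkv => by simpa using h1 kv hkv)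
    have hmem : (1 : Int) ∉ (PySem.Dict.mk grid).values := by
      intro h
      obtain ⟨kv, hkv, hv⟩ := List.mem_map.mp (show (1:Int) ∈ grid.map Prod.snd from h)
      exact h1 kv hkv hv
    have hcount : ((PySem.Dict.mk grid).values).count 1 = 0 := List.count_eq_zero.mpr hmem
    have hcon : ((PySem.Dict.mk grid).values).contains 1 = false := by
      simpa using hmem
    show pvLoopA _ _ 0 = pvBFS _ _ _ 0
    rw [hcount]
    have hones : ((PySem.Dict.mk grid).items.filter (fun kv => kv.2 == (1 : Int))).map Prod.fst
        = ([] : List (List Int)) := by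
      rw [show (PySem.Dict.mk grid).items = grid from rfl, hfil]; rfl
    rw [hones]
    simp [pvLoopA, pvBFS, PySem.Set.ofList]
    intro x hx
    exact h1 (x, 1) hx rfl
  show enable_o2 grid = enable_o2_alt grid
  unfold enable_o2 enable_o2_alt
  have hitems : (PySem.Dict.mk grid).items = grid := rfl
  have hfuel : (PySem.Dict.values (PySem.Dict.mk grid)).count 1 =
      (((PySem.Dict.mk grid).items.filter (fun kv => kv.2 == (1 : Int))).map Prod.fst).length := by
    rw [hitems]
    exact pvFuel_eq grid
  rw [hfuel]
  apply pvBisim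
  refine ⟨⟨by simpa [PySem.Dict.keys, hitems] using hnd, by rw [hitems]; exact h3, by rw [hitems]; exact hlen⟩, ?_, ?_, ?_⟩
  · intro k
    rw [PySem.Set.mem_ofList _ k, hitems]
    simp only [List.mem_map, List.mem_filter]
    constructor
    · rintro ⟨kv, ⟨hkv, h1⟩, rfl⟩
      rw [pv_eta (show kv.2 = 1 by simpa using h1)]
      exact hkv
    · intro h
      exact ⟨(k, 1), ⟨h, by simp⟩, rfl⟩
  · intro f hf
    rw [PySem.Set.mem_ofList _ f, hitems] at hf
    obtain ⟨kv, hkv, rfl⟩ := List.mem_map.mp hf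
    rw [List.mem_filter] at hkv
    rw [hitems, pv_eta (show kv.2 = 2 by simpa using hkv.2)]
    exact hkv.1
  · intro c hc
    rw [hitems] at hc ⊢
    constructor
    · intro hT
      obtain ⟨t, ht2, hcn⟩ := (pv_mem_targets _ _).mp hT
      obtain ⟨x, y, rfl⟩ := pv_pair_of_len2 (hlen (t, 2) ht2 (Or.inr rfl))
      have hct : c ≠ [x, y] := by
        intro h
        have hg2 : (PySem.Dict.mk grid).get? [x, y] = some 2 :=
          PySem.Dict.get?_of_mem_items _ (by rw [hitems]; exact ht2) (by simpa [PySem.Dict.keys, hitems] using hnd)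
        have h1' : ([x, y], (1 : Int)) ∈ grid := h ▸ hc
        have := pv_mem_items_val hnd h1' hg2
        simp at this
      rw [pvNbrs5_pair] at hcn
      rcases List.mem_cons.mp hcn with h | h
      · exact absurd h hct
      · refine ⟨[x, y], ?_, h⟩
        rw [PySem.Set.mem_ofList]
        exact List.mem_map.mpr ⟨([x, y], 2), List.mem_filter.mpr ⟨ht2, by simp⟩, rfl⟩
    · rintro ⟨f, hfF, hcn⟩
      rw [PySem.Set.mem_ofList] at hfF
      obtain ⟨kv, hkv, rfl⟩ := List.mem_map.mp hfF
      rw [List.mem_filter] at hkv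
      have h2 : (kv.1, (2 : Int)) ∈ grid := by
        rw [pv_eta (show kv.2 = 2 by simpa using hkv.2)]
        exact hkv.1
      obtain ⟨x, y, hxy⟩ := pv_pair_of_len2 (hlen (kv.1, 2) h2 (Or.inr rfl))
      rw [hxy] at hcn h2
      exact (pv_mem_targets _ _).mpr ⟨[x, y], h2, by rw [pvNbrs5_pair]; exact List.mem_cons_of_mem _ hcn⟩
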